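-- pv_equiv track=rewrite | github.com/Geon-05/dailycoding | programmers_입문/day8/day8_2.py | solution
-- ===== SOURCE A (Python) =====
-- def solution(age):
--     answer = ''
--     num_dict = {}
--     simple_str = 'abcdefghij'
--     for idx, i in enumerate(simple_str):
--         num_dict[str(idx)] = i
--     for i in str(age):
--         answer += num_dict[i]
--     return answer
-- ===== SOURCE B (Python) =====
-- def solution(age):
--     if age == 0:
--         return 'a'
--     out = []
--     n = age
--     while n > 0:
--         n, d = divmod(n, 10)
--         out.append(chr(97 + d))
--     return ''.join(reversed(out))
-- ===== Notes on version B (the rewrite author's own statement) =====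
-- stated objective: alternative
-- what changed: Never converts the number to a string: extracts digits arithmetically with divmod from the least-significant end, emits letters in reverse and flips the list at the end, instead of A's dict lookup over the characters of str(age).
import Mathlib
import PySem

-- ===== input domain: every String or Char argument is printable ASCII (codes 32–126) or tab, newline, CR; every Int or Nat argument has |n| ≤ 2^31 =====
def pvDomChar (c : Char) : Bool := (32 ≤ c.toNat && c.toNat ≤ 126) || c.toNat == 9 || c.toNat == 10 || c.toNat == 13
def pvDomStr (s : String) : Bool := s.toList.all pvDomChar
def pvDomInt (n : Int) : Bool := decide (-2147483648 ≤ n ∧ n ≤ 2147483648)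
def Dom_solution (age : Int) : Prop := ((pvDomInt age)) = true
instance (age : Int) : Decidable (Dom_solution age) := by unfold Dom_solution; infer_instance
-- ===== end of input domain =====

-- B never builds str(age): it peels digits arithmetically with divmod (least-significant first) and reverses, replacing A's dict lookup over the decimal string.


-- ===== PORT A =====
-- num_dict built by the first loop: for idx, i in enumerate('abcdefghij'): num_dict[str(idx)] = i
def pvNumDict : PySem.Dict String Char :=
  (PySem.List.enumerate "abcdefghij".toList 0).foldl
    (fun d p => d.insert (PySem.Int.toStr p.1) p.2) PySem.Dict.empty

def solution (age : Int) : String :=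
  -- answer accumulated by 'answer += num_dict[i]' over str(age); the getD default is
  -- only reachable where Python raises KeyError (excluded by Pre_solution)
  String.ofList ((PySem.Int.toChars age).foldl
    (fun acc c => acc ++ [pvNumDict.getD (String.ofList [c]) ' ']) [])

-- ===== PORT B =====
-- the while loop: n, d = divmod(n, 10); out.append(chr(97 + d))
-- (for age < 0 the loop body never runs, so Int.toNat — which is 0 there — is exact)
def pvPeel (n : Nat) (out : List Char) : List Char :=
  if 0 < n then pvPeel (n / 10) (out ++ [Char.ofNat (97 + n % 10)]) else out
termination_by n
decreasing_by exact Nat.div_lt_self ‹0 < n› (by omega)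

def solution_alt (age : Int) : String :=
  if age = 0 then "a"
  else String.ofList (pvPeel age.toNat []).reverse

-- ===== PRECONDITION & SPEC =====
-- Pre_ excludes negative ages: on them str(age) starts with '-', so A raises KeyError.
def Pre_solution (age : Int) : Prop := 0 ≤ age
instance (age : Int) : Decidable (Pre_solution age) := by unfold Pre_solution; infer_instance
def pvWitness_solution : Int := 23

def Spec_solution (age : Int) (out : String) : Prop := out = solution_alt age
instance (age : Int) (out : String) : Decidable (Spec_solution age out) := by unfold Spec_solution; infer_instance

-- ===== CLAIM (what is proved, stated in full; the proofs are below) =====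
def Claim_equal_solution : Prop := ∀ (age : Int), Dom_solution age → Pre_solution age → Spec_solution age (solution age)

-- ===== LEMMAS AND PROOFS =====

-- reference list of decimal digits, least significant first
def digitsLSF (n : Nat) : List Nat :=
  if 0 < n then n % 10 :: digitsLSF (n / 10) else []
termination_by n
decreasing_by exact Nat.div_lt_self ‹0 < n› (by omega)

lemma digitsLSF_lt (n : Nat) : ∀ d ∈ digitsLSF n, d < 10 := by
  induction n using digitsLSF.induct with
  | case1 n hn ih =>
    intro d hd
    rw [digitsLSF.eq_def, if_pos hn] at hd
    rcases List.mem_cons.mp hd with h | h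
    · subst h; exact Nat.mod_lt _ (by omega)
    · exact ih d h
  | case2 n hn => intro d hd; rw [digitsLSF.eq_def, if_neg hn] at hd; simp at hd

-- B's loop produces the letters of digitsLSF, appended after out
lemma pvPeel_eq (n : Nat) : ∀ out, pvPeel n out = out ++ (digitsLSF n).map (fun d => Char.ofNat (97 + d)) := by
  induction n using digitsLSF.induct with
  | case1 n hn ih =>
    intro out
    rw [pvPeel.eq_def, if_pos hn, digitsLSF.eq_def, if_pos hn, ih]
    simp
  | case2 n hn =>
    intro out
    rw [pvPeel.eq_def, if_neg hn, digitsLSF.eq_def, if_neg hn]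
    simp

-- A's digit string: toDigitsCore is the reversed digitChar image of digitsLSF
lemma toDigitsCore_eq (fuel : Nat) : ∀ n acc, 0 < n → n < fuel →
    Nat.toDigitsCore 10 fuel n acc = ((digitsLSF n).map Nat.digitChar).reverse ++ acc := by
  induction fuel with
  | zero => intro n acc h1 h2; omega
  | succ f ih =>
    intro n acc h1 h2
    rw [Nat.toDigitsCore]
    by_cases hq : n / 10 = 0
    · rw [if_pos hq, digitsLSF.eq_def, if_pos h1, hq, digitsLSF.eq_def, if_neg (by omega)]
      simp
    · rw [if_neg hq,
        ih (n / 10) _ (by omega) (by have := Nat.div_lt_self h1 (by norm_num : 1 < 10); omega)]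
      rw [digitsLSF.eq_def (n := n), if_pos h1]
      simp

lemma toDigits_eq (n : Nat) (h : 0 < n) :
    Nat.toDigits 10 n = ((digitsLSF n).map Nat.digitChar).reverse := by
  have := toDigitsCore_eq (n + 1) n [] h (by omega)
  simpa [Nat.toDigits] using this

-- per digit, A's dict lookup of the digit char equals B's arithmetic letter
lemma lookup_digitChar (d : Nat) (hd : d < 10) :
    pvNumDict.getD (String.ofList [Nat.digitChar d]) ' ' = Char.ofNat (97 + d) := by
  interval_cases d <;> decide

-- ===== VERDICT (by name: the statement is the Claim_ definition above) =====
theorem solution_spec : Claim_equal_solution := by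
  intro age _ hpre
  show _ = _
  by_cases h0 : age = 0
  · subst h0; decide
  · have hpos : (0:Int) < age := lt_of_le_of_ne hpre (Ne.symm h0)
    have hn : 0 < age.toNat := by omega
    unfold solution solution_alt
    rw [if_neg h0]
    have hneg : ¬ age < 0 := by omega
    rw [PySem.Int.toChars, if_neg hneg, toDigits_eq age.toNat hn,
        PySem.List.foldl_append_singleton_eq_map, pvPeel_eq]
    simp only [List.nil_append, List.map_reverse, List.map_map]
    congr 2
    exact List.map_congr_left fun d hd => lookup_digitChar d (digitsLSF_lt _ d hd)
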